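-- pv_equiv track=rewrite | github.com/parkerjbeard/golfdaddy-brain-mono | backend/app/doc_agent/client_v2.py | _parse_diff_files
-- ===== SOURCE A (Python) =====
-- from typing import Optional, List, Dict, Any
--
-- def _parse_diff_files(diff: str) -> Dict[str, str]:
--     """
--     Parse unified diff to extract file paths and content.
--
--     Args:
--         diff: Unified diff content
--
--     Returns:
--         Dictionary mapping file paths to new content
--     """
--     # This is a simplified implementation
--     # In production, you'd want to use a proper diff parser
--     files = {}
--     current_file = None
--     current_content = []
--
--     for line in diff.split('\n'):
--         if line.startswith('+++ b/'):
--             if current_file: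
--                 files[current_file] = '\n'.join(current_content)
--             current_file = line[6:]
--             current_content = []
--         elif current_file and line.startswith('+') and not line.startswith('+++'):
--             current_content.append(line[1:])
--
--     if current_file:
--         files[current_file] = '\n'.join(current_content)
--
--     return files
-- ===== SOURCE B (Python) =====
-- def _parse_diff_files(diff: str) -> dict:
--     """Section-based parser: split the diff at '+++ b/' headers, then turn
--     each section into a (filename, added-content) pair."""
--     lines = diff.split('\n')
--     n = len(lines)
--     files = {}
--     i = 0
--     while i < n and not lines[i].startswith('+++ b/'):
--         i += 1  # ignore everything before the first header
--     while i < n: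
--         name = lines[i][6:]
--         j = i + 1
--         while j < n and not lines[j].startswith('+++ b/'):
--             j += 1
--         if name:
--             files[name] = '\n'.join(
--                 l[1:] for l in lines[i + 1:j]
--                 if l.startswith('+') and not l.startswith('+++'))
--         i = j
--     return files
-- ===== Notes on version B (the rewrite author's own statement) =====
-- stated objective: alternative
-- what changed: Replaced A's single line-by-line state machine (current_file/current_content mutable state with flushes) by a section-based decomposition: scan to each file-header line, slice out its section body, and map each section directly to a (filename, joined added lines) pair.
import Mathlib
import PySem

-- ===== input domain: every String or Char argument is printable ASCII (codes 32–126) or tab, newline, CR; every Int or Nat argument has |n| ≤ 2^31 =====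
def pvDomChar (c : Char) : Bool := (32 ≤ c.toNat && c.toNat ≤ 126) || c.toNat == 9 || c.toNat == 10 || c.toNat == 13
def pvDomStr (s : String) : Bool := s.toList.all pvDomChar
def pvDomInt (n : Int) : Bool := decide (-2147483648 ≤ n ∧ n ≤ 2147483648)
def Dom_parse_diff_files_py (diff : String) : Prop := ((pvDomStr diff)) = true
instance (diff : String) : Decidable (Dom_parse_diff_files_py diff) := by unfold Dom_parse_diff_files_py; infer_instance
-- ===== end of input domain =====

-- B replaces A's line-by-line state machine by a section-based decomposition (split at the diff's file-header lines
-- headers, then map each section to its added content); same cost, a different decomposition (objective: alternative).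

-- shared line predicates: line.startswith('+++ b/') and line.startswith('+') and not line.startswith('+++')
def pHeader (l : String) : Bool := PySem.Str.startswith l "+++ b/"
def pAdd (l : String) : Bool := PySem.Str.startswith l "+" && !PySem.Str.startswith l "+++"

-- ===== PORT A =====
-- the flush 'if current_file: files[current_file] = "\n".join(current_content)'
def pyAFlush (files : PySem.Dict String String) (cf : Option String) (cc : List String) :
    PySem.Dict String String :=
  match cf with
  | some f => if f == "" then files else files.insert f (PySem.Str.join "\n" cc)
  | none => files

-- Python truthiness of current_file (None or the empty string is falsy)
def pyATruthy (cf : Option String) : Bool :=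
  match cf with
  | some f => !(f == "")
  | none => false

-- the 'for line in diff.split("\n")' loop, with the trailing flush in the [] case
def pyAGo (lines : List String) (files : PySem.Dict String String)
    (cf : Option String) (cc : List String) : PySem.Dict String String :=
  match lines with
  | [] => pyAFlush files cf cc
  | line :: rest =>
    if pHeader line then
      pyAGo rest (pyAFlush files cf cc) (some (PySem.Str.slice line (some 6) none)) []
    else if pyATruthy cf && pAdd line then
      pyAGo rest files cf (cc ++ [PySem.Str.slice line (some 1) none])
    else
      pyAGo rest files cf cc

def parse_diff_files_py (diff : String) : List (String × String) :=
  (pyAGo ((PySem.Str.split? diff "\n").getD []) PySem.Dict.empty none []).items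

-- ===== PORT B =====
-- the '+'-lines of a section body, with the leading '+' stripped
def altAdded (body : List String) : List String :=
  (body.filter pAdd).map (fun l => PySem.Str.slice l (some 1) none)

-- outer while-loop: at each header, scan the section body (inner while = takeWhile/dropWhile)
def altGo (lines : List String) (files : PySem.Dict String String) : PySem.Dict String String :=
  match lines with
  | [] => files
  | l :: rest =>
    if pHeader l then
      let name := PySem.Str.slice l (some 6) none
      let files' := if name == "" then files
                    else files.insert name
                           (PySem.Str.join "\n" (altAdded (rest.takeWhile (fun x => !pHeader x))))
      altGo (rest.dropWhile (fun x => !pHeader x)) files'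
    else altGo rest files
termination_by lines.length
decreasing_by
  · have := List.length_dropWhile_le (fun x => !pHeader x) rest
    simp; omega
  · simp

def parse_diff_files_py_alt (diff : String) : List (String × String) :=
  (altGo ((PySem.Str.split? diff "\n").getD []) PySem.Dict.empty).items

-- ===== PRECONDITION & SPEC =====
def Spec_parse_diff_files_py (diff : String) (out : List (String × String)) : Prop := out = parse_diff_files_py_alt diff
instance (diff : String) (out : List (String × String)) : Decidable (Spec_parse_diff_files_py diff out) := by unfold Spec_parse_diff_files_py; infer_instance

-- ===== CLAIM (what is proved, stated in full; the proofs are below) =====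
def Claim_equal_parse_diff_files_py : Prop := ∀ (diff : String), Dom_parse_diff_files_py diff → Spec_parse_diff_files_py diff (parse_diff_files_py diff)

-- ===== LEMMAS AND PROOFS =====

-- altGo skips non-header lines without touching the state
lemma altGo_dropWhile (ls : List String) (files : PySem.Dict String String) :
    altGo (ls.dropWhile (fun x => !pHeader x)) files = altGo ls files := by
  induction ls generalizing files with
  | nil => rfl
  | cons l rest ih =>
    by_cases h : pHeader l = true
    · rw [List.dropWhile_cons_of_neg (by simp [h])]
    · rw [List.dropWhile_cons_of_pos (by simp [h]), ih]
      conv_rhs => rw [altGo]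
      rw [if_neg h]

lemma altAdded_nil : altAdded [] = [] := rfl

lemma altAdded_cons_pos {l : String} (tw : List String) (hp : pAdd l = true) :
    altAdded (l :: tw) = PySem.Str.slice l (some 1) none :: altAdded tw := by
  simp only [altAdded, List.filter_cons, if_pos hp, List.map_cons]

lemma altAdded_cons_neg {l : String} (tw : List String) (hp : ¬ pAdd l = true) :
    altAdded (l :: tw) = altAdded tw := by
  simp only [altAdded, List.filter_cons, if_neg hp]

-- A's loop, from any reachable state, computes what B's section fold computes
lemma pyAGo_eq (lines : List String) : ∀ (files : PySem.Dict String String)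
    (cf : Option String) (cc : List String),
    pyAGo lines files cf cc =
      match cf with
      | some f =>
          if f == "" then altGo lines files
          else altGo (lines.dropWhile (fun x => !pHeader x))
                 (files.insert f (PySem.Str.join "\n"
                   (cc ++ altAdded (lines.takeWhile (fun x => !pHeader x)))))
      | none => altGo lines files := by
  induction lines with
  | nil =>
    intro files cf cc
    cases cf with
    | none =>
      dsimp only [pyAGo, pyAFlush]
      rw [altGo]
    | some f =>
      dsimp only [pyAGo, pyAFlush]
      by_cases hf : (f == "") = true
      · rw [if_pos hf, if_pos hf, altGo]
      · rw [if_neg hf, if_neg hf]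
        simp [altAdded_nil, altGo]
  | cons l rest ih =>
    intro files cf cc
    have htwn : pHeader l = true → (l :: rest).takeWhile (fun x => !pHeader x) = [] := by
      intro h; simp [h]
    have hdwn : pHeader l = true → (l :: rest).dropWhile (fun x => !pHeader x) = l :: rest := by
      intro h; simp [h]
    by_cases h : pHeader l = true
    · -- header line: flush the pending file and start a new section
      rw [pyAGo, if_pos h, ih]
      dsimp only
      by_cases hn : (PySem.Str.slice l (some 6) none == "") = true
      · -- the new file name is empty (falsy): nothing else is recorded before the next header
        rw [if_pos hn]
        have hL : ∀ d : PySem.Dict String String, altGo (l :: rest) d = altGo rest d := by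
          intro d
          conv_lhs => rw [altGo]
          rw [if_pos h]
          dsimp only
          rw [if_pos hn, altGo_dropWhile]
        cases cf with
        | none => dsimp only [pyAFlush]; rw [hL]
        | some f =>
          dsimp only [pyAFlush]
          by_cases hf : (f == "") = true
          · rw [if_pos hf, if_pos hf, hL]
          · rw [if_neg hf, if_neg hf, htwn h, hdwn h, altAdded_nil, List.append_nil, hL]
      · -- a real file name: it is inserted with the added lines of its section
        rw [if_neg hn]
        have hR : ∀ d : PySem.Dict String String, altGo (l :: rest) d =
            altGo (rest.dropWhile (fun x => !pHeader x))
              (d.insert (PySem.Str.slice l (some 6) none)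
                (PySem.Str.join "\n" (altAdded (rest.takeWhile (fun x => !pHeader x))))) := by
          intro d
          conv_lhs => rw [altGo]
          rw [if_pos h]
          dsimp only
          rw [if_neg hn]
        cases cf with
        | none => dsimp only [pyAFlush]; rw [hR, List.nil_append]
        | some f =>
          dsimp only [pyAFlush]
          by_cases hf : (f == "") = true
          · rw [if_pos hf, if_pos hf, hR, List.nil_append]
          · rw [if_neg hf, if_neg hf, htwn h, hdwn h, altAdded_nil, List.append_nil,
                hR, List.nil_append]
    · -- non-header line
      have htw : (l :: rest).takeWhile (fun x => !pHeader x) =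
          l :: rest.takeWhile (fun x => !pHeader x) := by simp [h]
      have hdw : (l :: rest).dropWhile (fun x => !pHeader x) =
          rest.dropWhile (fun x => !pHeader x) := by simp [h]
      have haltgo : ∀ d : PySem.Dict String String, altGo (l :: rest) d = altGo rest d := by
        intro d
        conv_lhs => rw [altGo]
        rw [if_neg h]
      rw [pyAGo, if_neg h]
      by_cases hc : (pyATruthy cf && pAdd l) = true
      · -- an accumulated '+' content line
        rw [if_pos hc, ih]
        rcases Bool.and_eq_true .. |>.mp hc with ⟨ht, hp⟩
        cases cf with
        | none => simp [pyATruthy] at ht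
        | some f =>
          have hf : ¬ (f == "") = true := by simpa [pyATruthy] using ht
          dsimp only
          rw [if_neg hf, if_neg hf, htw, hdw, altAdded_cons_pos _ hp]
          simp
      · -- an ignored line
        rw [if_neg hc, ih]
        cases cf with
        | none => dsimp only; rw [haltgo]
        | some f =>
          dsimp only
          by_cases hf : (f == "") = true
          · rw [if_pos hf, if_pos hf, haltgo]
          · have hp : ¬ pAdd l = true := by
              intro hp
              exact hc (by simp [pyATruthy, hf, hp])
            rw [if_neg hf, if_neg hf, htw, hdw, altAdded_cons_neg _ hp]

-- ===== VERDICT (by name: the statement is the Claim_ definition above) =====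
theorem parse_diff_files_py_spec : Claim_equal_parse_diff_files_py := by
  intro diff _
  unfold Spec_parse_diff_files_py parse_diff_files_py parse_diff_files_py_alt
  rw [pyAGo_eq]
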